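-- pv_equiv track=rewrite | github.com/PieroEngineer/Desktop-GUI-apps | SmartChatBot/app/utils/handle_texts.py | bold_text
-- ===== SOURCE A (Python) =====
-- def bold_text(input_string):
--     """
--     Detects double asterisks that enclose a text and replaces them
--     with <b> and </b> tags.
--
--     Args:
--         input_string (str): The string to be processed.
--
--     Returns:
--         str: The modified string with bolded text.
--     """
--     new_string = ""
--     start = 0
--
--     while True:
--         # Find the first occurrence of '**'
--         open_tag_index = input_string.find('**', start)
--         if open_tag_index == -1:
--             # If no more '**' are found, append the rest of the string
--             new_string += input_string[start:]
--             break
--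
--         # Find the closing '**'
--         close_tag_index = input_string.find('**', open_tag_index + 2)
--         if close_tag_index == -1:
--             # If a closing '**' is not found, treat the rest of the string as plain text
--             new_string += input_string[start:]
--             break
--
--         # Append the text before the bolded part
--         new_string += input_string[start:open_tag_index]
--
--         # Append the bold tag and the text within the asterisks
--         bolded_text = input_string[open_tag_index + 2:close_tag_index]
--         new_string += f"<b>{bolded_text}</b>"
--
--         # Update the starting position for the next search
--         start = close_tag_index + 2
--
--     return new_string
-- ===== SOURCE B (Python) =====
-- def bold_text(input_string):
--     """Replace **-enclosed text with <b>...</b> via one split on '**'."""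
--     parts = input_string.split('**')
--
--     def glue(ps):
--         if not ps:
--             return ''
--         if len(ps) == 1:
--             return '**' + ps[0]
--         return '<b>' + ps[0] + '</b>' + ps[1] + glue(ps[2:])
--
--     return parts[0] + glue(parts[1:])
-- ===== Notes on version B (the rewrite author's own statement) =====
-- stated objective: simpler
-- what changed: Replaced the manual while-loop of repeated find('**', start) calls and slice bookkeeping with a single split('**') followed by gluing alternate parts into <b>...</b> (re-inserting a literal '**' for a dangling unmatched opener).
import Mathlib
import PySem

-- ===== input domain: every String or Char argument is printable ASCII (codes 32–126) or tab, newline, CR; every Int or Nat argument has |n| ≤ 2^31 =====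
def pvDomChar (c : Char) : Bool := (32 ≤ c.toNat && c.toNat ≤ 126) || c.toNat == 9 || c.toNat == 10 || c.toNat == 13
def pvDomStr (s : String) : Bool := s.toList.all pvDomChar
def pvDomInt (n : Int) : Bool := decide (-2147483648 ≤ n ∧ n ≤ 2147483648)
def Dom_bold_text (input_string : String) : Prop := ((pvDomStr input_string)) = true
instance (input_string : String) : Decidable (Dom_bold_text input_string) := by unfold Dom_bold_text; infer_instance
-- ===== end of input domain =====

-- B replaces A's while-loop of find('**', start) calls and slice bookkeeping by one split('**')
-- plus gluing alternate parts into <b>…</b>; objective: simpler (same asymptotic cost).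

-- ===== PORT A =====
-- A's while loop: state (new_string, start); fuel only makes the recursion total
-- (length+1 iterations always suffice since start grows each round).
def boldLoopA (l : List Char) (fuel : Nat) (new_string : List Char) (start : Nat) : List Char :=
  match fuel with
  | 0 => new_string
  | fuel + 1 =>
    let o := PySem.Chars.findFrom l ['*','*'] (start : Int) none
    if o = -1 then
      new_string ++ PySem.List.slice l (some (start : Int)) none
    else
      let c := PySem.Chars.findFrom l ['*','*'] (o + 2) none
      if c = -1 then
        new_string ++ PySem.List.slice l (some (start : Int)) none
      else
        boldLoopA l fuel
          (new_string ++ PySem.List.slice l (some (start : Int)) (some o)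
            ++ ['<','b','>'] ++ PySem.List.slice l (some (o + 2)) (some c) ++ ['<','/','b','>'])
          (c.toNat + 2)

def bold_text (input_string : String) : String :=
  String.ofList (boldLoopA input_string.toList (input_string.toList.length + 1) [] 0)

-- ===== PORT B =====
-- Source B's glue: one part left = unmatched opener, else bold the first of each pair.
def boldGlue : List (List Char) → List Char
  | [] => []
  | [x] => '*' :: '*' :: x
  | x :: y :: rest => ['<','b','>'] ++ x ++ ['<','/','b','>'] ++ y ++ boldGlue rest

def bold_text_alt (input_string : String) : String :=
  match PySem.Chars.splitOn input_string.toList ['*','*'] with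
  | [] => ""   -- unreachable: str.split never yields an empty list
  | p :: ps => String.ofList (p ++ boldGlue ps)

-- ===== PRECONDITION & SPEC =====
def Spec_bold_text (input_string : String) (out : String) : Prop := out = bold_text_alt input_string
instance (input_string : String) (out : String) : Decidable (Spec_bold_text input_string out) := by unfold Spec_bold_text; infer_instance

-- ===== CLAIM (what is proved, stated in full; the proofs are below) =====
def Claim_equal_bold_text : Prop := ∀ (input_string : String), Dom_bold_text input_string → Spec_bold_text input_string (bold_text input_string)

-- ===== LEMMAS AND PROOFS =====

-- B's assembled result as a function of the split (head ++ glue of tail).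
def bglue : List (List Char) → List Char
  | [] => []
  | p :: ps => p ++ boldGlue ps

theorem go_ne_nil (sep : List Char) :
    ∀ (fuel : Nat) (l cur : List Char) (acc : List (List Char)),
      PySem.Chars.splitOn.go sep fuel l cur acc ≠ [] := by
  intro fuel
  induction fuel with
  | zero => intro l cur acc; simp [PySem.Chars.splitOn.go]
  | succ f ih =>
    intro l cur acc
    cases l with
    | nil => simp [PySem.Chars.splitOn.go]
    | cons c rest =>
      simp only [PySem.Chars.splitOn.go]
      split_ifs with h
      · exact ih _ _ _
      · exact ih _ _ _

theorem go_acc (sep : List Char) (hsep : sep ≠ []) :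
    ∀ (n : Nat) (l : List Char), l.length ≤ n →
      ∀ (fuel : Nat), l.length < fuel → ∀ (cur : List Char) (acc : List (List Char)),
        PySem.Chars.splitOn.go sep fuel l cur acc
          = acc.reverse ++ (PySem.Chars.splitOn.go sep (l.length + 1) l [] []).modifyHead (cur.reverse ++ ·) := by
  intro n
  induction n with
  | zero =>
    intro l hl fuel hf cur acc
    have : l = [] := List.length_eq_zero_iff.mp (Nat.le_zero.mp hl)
    subst this
    obtain ⟨f, rfl⟩ := Nat.exists_eq_add_of_lt hf
    simp [PySem.Chars.splitOn.go]
  | succ n ih =>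
    intro l hl fuel hf cur acc
    cases l with
    | nil =>
      obtain ⟨f, rfl⟩ := Nat.exists_eq_add_of_lt hf
      simp [PySem.Chars.splitOn.go]
    | cons c rest =>
      cases fuel with
      | zero => omega
      | succ f =>
      by_cases h : sep.isPrefixOf (c :: rest)
      · -- separator found here: both sides take the prefix branch
        have hslen : 1 ≤ sep.length := by
          cases sep with
          | nil => exact absurd rfl hsep
          | cons _ _ => simp
        have hdl : (List.drop sep.length (c :: rest)).length ≤ n := by
          simp only [List.length_drop, List.length_cons] at hl ⊢
          omega
        simp only [PySem.Chars.splitOn.go, h, if_pos, List.reverse_nil]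
        rw [ih _ hdl f (by simp only [List.length_drop, List.length_cons] at hf ⊢; omega) [] (cur.reverse :: acc),
            ih _ hdl ((c :: rest).length) (by simp only [List.length_drop, List.length_cons]; omega) [] ([[]])]
        cases hX : (PySem.Chars.splitOn.go sep ((List.drop sep.length (c :: rest)).length + 1) (List.drop sep.length (c :: rest)) [] []) with
        | nil => exact absurd hX (go_ne_nil sep _ _ _ _)
        | cons p ps => simp
      · -- no separator here: both sides push c onto cur
        have hdl : rest.length ≤ n := by simp at hl; omega
        simp only [PySem.Chars.splitOn.go, h, Bool.false_eq_true, if_false, List.length_cons]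
        rw [ih _ hdl f (by simp only [List.length_cons] at hf; omega) (c :: cur) acc,
            ih _ hdl (rest.length + 1) (by omega) [c] []]
        cases hX : (PySem.Chars.splitOn.go sep (rest.length + 1) rest [] []) with
        | nil => exact absurd hX (go_ne_nil sep _ _ _ _)
        | cons p ps => simp

theorem splitOn_ne_nil (l sep : List Char) : PySem.Chars.splitOn l sep ≠ [] := by
  unfold PySem.Chars.splitOn
  exact go_ne_nil sep _ _ _ _

theorem splitOn_prefix (l sep : List Char) (hsep : sep ≠ []) (h : sep <+: l) :
    PySem.Chars.splitOn l sep = [] :: PySem.Chars.splitOn (l.drop sep.length) sep := by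
  have hslen : 1 ≤ sep.length := by
    cases sep with
    | nil => exact absurd rfl hsep
    | cons _ _ => simp
  cases l with
  | nil =>
    have : sep = [] := List.prefix_nil.mp h
    exact absurd this hsep
  | cons c rest =>
    unfold PySem.Chars.splitOn
    simp only [List.length_cons]
    rw [show rest.length + 1 + 1 = (rest.length + 1) + 1 from rfl]
    simp only [PySem.Chars.splitOn.go, List.isPrefixOf_iff_prefix.mpr h, if_pos]
    simp only [List.reverse_nil]
    rw [go_acc sep hsep (List.drop sep.length (c :: rest)).length (List.drop sep.length (c :: rest)) le_rfl
        (rest.length + 1) (by simp only [List.length_drop, List.length_cons]; omega) [] [[]]]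
    cases hX : (PySem.Chars.splitOn.go sep ((List.drop sep.length (c :: rest)).length + 1) (List.drop sep.length (c :: rest)) [] []) with
    | nil => exact absurd hX (go_ne_nil sep _ _ _ _)
    | cons p ps => simp

theorem splitOn_cons_neg (c : Char) (rest sep : List Char) (hsep : sep ≠ [])
    (h : ¬ sep <+: (c :: rest)) :
    PySem.Chars.splitOn (c :: rest) sep = (PySem.Chars.splitOn rest sep).modifyHead (c :: ·) := by
  unfold PySem.Chars.splitOn
  simp only [List.length_cons]
  rw [show rest.length + 1 + 1 = (rest.length + 1) + 1 from rfl]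
  have hnp : sep.isPrefixOf (c :: rest) = false := by
    by_contra hcon
    exact h (List.isPrefixOf_iff_prefix.mp (by simpa using hcon))
  simp only [PySem.Chars.splitOn.go, hnp, Bool.false_eq_true, if_false]
  rw [go_acc sep hsep rest.length rest le_rfl (rest.length + 1) (by omega) [c] []]
  cases hX : (PySem.Chars.splitOn.go sep (rest.length + 1) rest [] []) with
  | nil => exact absurd hX (go_ne_nil sep _ _ _ _)
  | cons p ps => simp

theorem splitOn_not_in (l sep : List Char) (hsep : sep ≠ []) (h : ¬ sep <:+: l) :
    PySem.Chars.splitOn l sep = [l] := by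
  induction l with
  | nil =>
    unfold PySem.Chars.splitOn
    simp [PySem.Chars.splitOn.go]
  | cons c rest ih =>
    have hnp : ¬ sep <+: (c :: rest) := fun hp => h hp.isInfix
    have hnr : ¬ sep <:+: rest := fun hi => h (hi.trans (List.suffix_cons c rest).isInfix)
    rw [splitOn_cons_neg c rest sep hsep hnp, ih hnr]
    simp

theorem splitOn_at_find (l sep : List Char) (hsep : sep ≠ [])
    (h : 0 ≤ PySem.Chars.find l sep) :
    PySem.Chars.splitOn l sep
      = l.take (PySem.Chars.find l sep).toNat
        :: PySem.Chars.splitOn (l.drop ((PySem.Chars.find l sep).toNat + sep.length)) sep := by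
  induction l with
  | nil =>
    obtain ⟨hpre, -⟩ := PySem.Chars.find_spec (s := []) (sub := sep) h
    simp only [List.drop_nil] at hpre
    exact absurd (List.prefix_nil.mp hpre) hsep
  | cons c rest ih =>
    obtain ⟨hpre, hmin⟩ := PySem.Chars.find_spec (s := c :: rest) (sub := sep) h
    by_cases hp : sep <+: (c :: rest)
    · have h0 : (PySem.Chars.find (c :: rest) sep).toNat = 0 := by
        by_contra hne
        exact hmin 0 (Nat.pos_of_ne_zero hne) (by simpa using hp)
      rw [splitOn_prefix (c :: rest) sep hsep hp]
      simp [h0]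
    · -- first occurrence is inside rest, one position earlier
      have hiN : (PySem.Chars.find (c :: rest) sep).toNat ≠ 0 := by
        intro h0
        rw [h0] at hpre
        exact hp (by simpa using hpre)
      set iN := (PySem.Chars.find (c :: rest) sep).toNat with hiNdef
      have hpre' : sep <+: rest.drop (iN - 1) := by
        have : (c :: rest).drop iN = rest.drop (iN - 1) := by
          cases hiNeq : iN with
          | zero => exact absurd hiNeq hiN
          | succ k => simp
        rwa [this] at hpre
      have hinf : sep <:+: rest :=
        hpre'.isInfix.trans (List.drop_suffix _ _).isInfix
      have hfr : 0 ≤ PySem.Chars.find rest sep := (PySem.Chars.find_nonneg_iff (s := rest) (sub := sep)).mpr hinf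
      obtain ⟨hpre2, hmin2⟩ := PySem.Chars.find_spec (s := rest) (sub := sep) hfr
      have hjj : (PySem.Chars.find rest sep).toNat = iN - 1 := by
        by_contra hne
        rcases Nat.lt_or_ge (PySem.Chars.find rest sep).toNat (iN - 1) with hlt | hge
        · exact hmin ((PySem.Chars.find rest sep).toNat + 1) (by omega)
            (by simpa using hpre2)
        · exact hmin2 (iN - 1) (by omega) hpre'
      rw [splitOn_cons_neg c rest sep hsep hp, ih hfr, hjj]
      have htake : c :: rest.take (iN - 1) = (c :: rest).take iN := by
        cases hiNeq : iN with
        | zero => exact absurd hiNeq hiN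
        | succ k => simp
      have hdrop : rest.drop (iN - 1 + sep.length) = (c :: rest).drop (iN + sep.length) := by
        cases hiNeq : iN with
        | zero => exact absurd hiNeq hiN
        | succ k => simp [Nat.succ_add]
      simp [List.modifyHead, htake, hdrop]

-- sep length 2 prefix at position k forces k + 2 ≤ length
theorem prefix_drop_len {l : List Char} {k : Nat} (h : ['*','*'] <+: l.drop k) :
    k + 2 ≤ l.length := by
  have := h.length_le
  simp only [List.length_cons, List.length_nil, List.length_drop] at this
  by_cases hk : k ≤ l.length
  · omega
  · rw [List.drop_eq_nil_of_le (by omega)] at h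
    exact absurd (List.prefix_nil.mp h) (by simp)

-- the suffix from start decomposes at the first occurrence k: plain ++ ** ++ rest
theorem suffix_decomp (l : List Char) (start k : Nat) (hks : start ≤ k)
    (h : ['*','*'] <+: l.drop k) :
    l.drop start = (l.drop start).take (k - start) ++ ['*','*'] ++ l.drop (k + 2) := by
  obtain ⟨t, ht⟩ := h
  have ht2 : l.drop (k + 2) = t := by
    calc l.drop (k + 2) = List.drop 2 (l.drop k) := by rw [List.drop_drop, Nat.add_comm]
    _ = List.drop 2 (['*','*'] ++ t) := by rw [ht]
    _ = t := by simp
  have hsplit : l.drop start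
      = (l.drop start).take (k - start) ++ (l.drop start).drop (k - start) :=
    (List.take_append_drop _ _).symm
  have hdd : (l.drop start).drop (k - start) = l.drop k := by
    rw [List.drop_drop]; congr 1; omega
  conv_lhs => rw [hsplit]
  rw [hdd, ← ht, ht2]
  simp

-- main loop invariant: A's loop from position start computes B's glue of the split of the suffix
theorem loopA_eq (l : List Char) :
    ∀ (fuel start : Nat) (ns : List Char), start ≤ l.length → l.length - start < fuel →
      boldLoopA l fuel ns start = ns ++ bglue (PySem.Chars.splitOn (l.drop start) ['*','*']) := by
  intro fuel
  induction fuel with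
  | zero => intro start ns h1 h2; omega
  | succ f ih =>
    intro start ns hstart hfuel
    have hsep : (['*','*'] : List Char) ≠ [] := by simp
    rw [boldLoopA]
    simp only [PySem.Chars.findFrom_natCast l ['*','*'] start hstart]
    by_cases h1 : PySem.Chars.find (l.drop start) ['*','*'] = -1
    · -- no '**' left: append the rest
      simp only [h1, reduceIte]
      rw [PySem.List.slice_from_natCast,
          splitOn_not_in _ _ hsep ((PySem.Chars.find_eq_neg_one_iff (s := l.drop start) (sub := ['*','*'])).mp h1)]
      simp [bglue, boldGlue]
    · have hge : 0 ≤ PySem.Chars.find (l.drop start) ['*','*'] := by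
        have := PySem.Chars.neg_one_le_find (s := l.drop start) (sub := ['*','*'])
        omega
      set iN := (PySem.Chars.find (l.drop start) ['*','*']).toNat with hiN
      obtain ⟨hpre1, -⟩ := PySem.Chars.find_spec (s := l.drop start) (sub := ['*','*']) hge
      rw [List.drop_drop] at hpre1
      rw [← hiN] at hpre1
      have hbound1 : start + iN + 2 ≤ l.length := by
        have := prefix_drop_len hpre1; omega
      have hne1 : ¬ ((start : Int) + PySem.Chars.find (l.drop start) ['*','*'] = -1) := by omega
      simp only [h1, hne1, reduceIte]
      have hcast1 : (start : Int) + PySem.Chars.find (l.drop start) ['*','*'] + 2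
          = ((start + iN + 2 : Nat) : Int) := by push_cast; omega
      rw [hcast1, PySem.Chars.findFrom_natCast l ['*','*'] (start + iN + 2) hbound1]
      by_cases h2 : PySem.Chars.find (l.drop (start + iN + 2)) ['*','*'] = -1
      · -- opener without closer: rest of string stays literal
        simp only [h2, reduceIte]
        rw [PySem.List.slice_from_natCast,
            splitOn_at_find (l.drop start) _ hsep hge]
        simp only [← hiN, List.length_cons, List.length_nil, List.drop_drop]
        rw [show start + (iN + (0 + 1 + 1)) = start + iN + 2 by omega,
            splitOn_not_in _ _ hsep ((PySem.Chars.find_eq_neg_one_iff (s := l.drop (start + iN + 2)) (sub := ['*','*'])).mp h2)]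
        have hdec := suffix_decomp l start (start + iN) (by omega) hpre1
        rw [show start + iN - start = iN by omega,
            show start + iN + 2 = start + iN + 2 from rfl] at hdec
        conv_lhs => rw [hdec]
        simp [bglue, boldGlue]
      · have hge2 : 0 ≤ PySem.Chars.find (l.drop (start + iN + 2)) ['*','*'] := by
          have := PySem.Chars.neg_one_le_find (s := l.drop (start + iN + 2)) (sub := ['*','*'])
          omega
        set jN := (PySem.Chars.find (l.drop (start + iN + 2)) ['*','*']).toNat with hjN
        obtain ⟨hpre2, -⟩ := PySem.Chars.find_spec (s := l.drop (start + iN + 2)) (sub := ['*','*']) hge2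
        rw [List.drop_drop] at hpre2
        rw [← hjN] at hpre2
        have hbound2 : start + iN + 2 + jN + 2 ≤ l.length := by
          have := prefix_drop_len hpre2; omega
        have hne2 : ¬ (((start + iN + 2 : Nat) : Int) + PySem.Chars.find (l.drop (start + iN + 2)) ['*','*'] = -1) := by
          push_cast; omega
        simp only [h2, hne2, reduceIte]
        have hcnat : (((start + iN + 2 : Nat) : Int) + PySem.Chars.find (l.drop (start + iN + 2)) ['*','*']).toNat
            = start + iN + 2 + jN := by push_cast; omega
        have hcval : ((start + iN + 2 : Nat) : Int) + PySem.Chars.find (l.drop (start + iN + 2)) ['*','*']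
            = ((start + iN + 2 + jN : Nat) : Int) := by push_cast; omega
        -- rewrite the two slices as take/drop
        have hsl1 : PySem.List.slice l (some (start : Int))
              (some ((start : Int) + PySem.Chars.find (l.drop start) ['*','*']))
            = (l.drop start).take iN := by
          have : (start : Int) + PySem.Chars.find (l.drop start) ['*','*']
              = ((start : Int) + (iN : Int)) := by omega
          rw [this, PySem.List.slice_natCast_add]
        have hsl2 : PySem.List.slice l (some ((start + iN + 2 : Nat) : Int))
              (some (((start + iN + 2 : Nat) : Int) + PySem.Chars.find (l.drop (start + iN + 2)) ['*','*']))
            = (l.drop (start + iN + 2)).take jN := by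
          have : ((start + iN + 2 : Nat) : Int) + PySem.Chars.find (l.drop (start + iN + 2)) ['*','*']
              = (((start + iN + 2 : Nat) : Int) + (jN : Int)) := by omega
          rw [this, PySem.List.slice_natCast_add]
        rw [hcval] at hsl2
        rw [hsl1, hcval, hsl2]
        simp only [Int.toNat_natCast]
        rw [ih (start + iN + 2 + jN + 2) _ hbound2 (by omega)]
        rw [splitOn_at_find (l.drop start) _ hsep hge]
        simp only [← hiN, List.length_cons, List.length_nil, List.drop_drop]
        rw [show start + (iN + (0 + 1 + 1)) = start + iN + 2 by omega]
        rw [splitOn_at_find (l.drop (start + iN + 2)) _ hsep hge2]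
        simp only [← hjN, List.length_cons, List.length_nil, List.drop_drop]
        rw [show start + iN + 2 + (jN + (0 + 1 + 1)) = start + iN + 2 + jN + 2 by omega]
        cases hX : PySem.Chars.splitOn (l.drop (start + iN + 2 + jN + 2)) ['*','*'] with
        | nil => exact absurd hX (splitOn_ne_nil _ _)
        | cons p ps => simp [bglue, boldGlue]

-- ===== VERDICT (by name: the statement is the Claim_ definition above) =====
theorem bold_text_spec : Claim_equal_bold_text := by
  intro s _
  unfold Spec_bold_text bold_text bold_text_alt
  rw [loopA_eq s.toList (s.toList.length + 1) 0 [] (by omega) (by omega)]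
  cases hX : PySem.Chars.splitOn s.toList ['*','*'] with
  | nil => exact absurd hX (splitOn_ne_nil _ _)
  | cons p ps => simp [hX, bglue]
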